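-- pv_equiv track=rewrite | github.com/prymnumber/AoC | generators.py | get_perms3
-- ===== SOURCE A (Python) =====
-- def get_perms3(some_list):
--     perm_list = list()
--     l_list = list(some_list)
--     #pdb.set_trace()
--     for k in some_list:
--         if len(l_list) <=1:
--             return l_list
--
--         for i in range(len(l_list)-1):
--             idx1 = i
--             idx2 = i+1
--             swap1=l_list[idx1]
--             swap2=l_list[idx2]
--
--             l_list[idx2] = swap1
--             l_list[idx1] = swap2
--             xx = l_list[:]
--             perm_list.append(xx)
--
--     return perm_list
-- ===== SOURCE B (Python) =====
-- def get_perms3(some_list):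
--     # Slice-based rotation: each pass emits the snapshots of the head bubbling
--     # rightwards as direct slice concatenations, then rotates the list left.
--     cur = list(some_list)
--     n = len(cur)
--     out = []
--     for _ in range(n):
--         head, rest = cur[0], cur[1:]
--         for j in range(1, n):
--             out.append(rest[:j] + [head] + rest[j:])
--         cur = rest + [head]
--     return out
-- ===== Notes on version B (the rewrite author's own statement) =====
-- stated objective: alternative
-- what changed: B replaces the in-place adjacent-swap mutation with direct slice concatenation: each pass builds every snapshot as rest[:j]+[head]+rest[j:] and then rotates the list left, instead of repeatedly swapping and copying the mutable list.
-- outside the precondition, e.g. on get_perms3([5]): A returns [5], B returns []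
import Mathlib
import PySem

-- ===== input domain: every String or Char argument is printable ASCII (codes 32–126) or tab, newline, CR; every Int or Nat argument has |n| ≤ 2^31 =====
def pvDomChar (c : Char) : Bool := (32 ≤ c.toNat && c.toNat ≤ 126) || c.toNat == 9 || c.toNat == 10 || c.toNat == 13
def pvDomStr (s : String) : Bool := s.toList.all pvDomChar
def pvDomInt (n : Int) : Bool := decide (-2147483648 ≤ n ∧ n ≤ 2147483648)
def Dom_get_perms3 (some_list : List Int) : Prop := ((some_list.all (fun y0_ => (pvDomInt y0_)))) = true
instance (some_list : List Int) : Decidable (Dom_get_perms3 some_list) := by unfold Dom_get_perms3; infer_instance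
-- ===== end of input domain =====

-- B builds each snapshot by slice concatenation and rotates the list left once per pass,
-- instead of A's in-place adjacent swaps with a copy appended after each swap (alternative decomposition, same cost).


-- ===== PORT A =====
-- one iteration of A's inner for-loop: swap l_list[i] and l_list[i+1] in place, then append a copy.
-- whenever this runs, i and i+1 are in range (i < len-1), so getD's default 0 is never used.
def pvSwapStepA (st : List Int × List (List Int)) (i : Nat) : List Int × List (List Int) :=
  let l_list := st.1
  let swap1 := l_list.getD i 0
  let swap2 := l_list.getD (i+1) 0
  let l2 := (l_list.set (i+1) swap1).set i swap2
  (l2, st.2 ++ [l2])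

-- A's outer 'for k in some_list' loop, carrying the mutable state (l_list, perm_list).
-- When len(l_list) <= 1 Python early-returns l_list ITSELF — a list of ints, not of lists;
-- that value is not expressible in the return type List (List Int), so such inputs
-- (exactly the singletons) are excluded by Pre_ and this branch returns [].
def pvOuterA : List Int → List Int → List (List Int) → List (List Int)
  | [], _, perm_list => perm_list
  | _ :: ks, l_list, perm_list =>
    if l_list.length ≤ 1 then []
    else
      let st := (List.range (l_list.length - 1)).foldl pvSwapStepA (l_list, perm_list)
      pvOuterA ks st.1 st.2

def get_perms3 (some_list : List Int) : List (List Int) :=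
  pvOuterA some_list some_list []

-- ===== PORT B =====
-- Source B: n passes over the state (cur, out); each pass appends rest[:j] + [head] + rest[j:]
-- for j in range(1, n) (here st.1.headD 0 = head = cur[0], st.1.tail = rest = cur[1:],
-- take/drop = the slices), then sets cur = rest + [head]; headD's default is never used (cur nonempty when the loop runs).
def get_perms3_alt (some_list : List Int) : List (List Int) :=
  let n := some_list.length
  ((List.range n).foldl (fun (st : List Int × List (List Int)) _ =>
      (st.1.tail ++ [st.1.headD 0],
       st.2 ++ (List.range' 1 (n - 1)).map
         (fun j => st.1.tail.take j ++ [st.1.headD 0] ++ st.1.tail.drop j)))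
    (some_list, [])).2

-- ===== PRECONDITION & SPEC =====
-- Pre_ excludes exactly the singleton lists: there A returns the bare input list [x] (a list
-- of ints, not of lists), which is not a value of the declared return type List (List Int).
def Pre_get_perms3 (some_list : List Int) : Prop := some_list.length ≠ 1
instance (some_list : List Int) : Decidable (Pre_get_perms3 some_list) := by unfold Pre_get_perms3; infer_instance
def pvWitness_get_perms3 : List Int := [1, 2]

def Spec_get_perms3 (some_list : List Int) (out : List (List Int)) : Prop := out = get_perms3_alt some_list
instance (some_list : List Int) (out : List (List Int)) : Decidable (Spec_get_perms3 some_list out) := by unfold Spec_get_perms3; infer_instance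

-- ===== CLAIM (what is proved, stated in full; the proofs are below) =====
def Claim_equal_get_perms3 : Prop := ∀ (some_list : List Int), Dom_get_perms3 some_list → Pre_get_perms3 some_list → Spec_get_perms3 some_list (get_perms3 some_list)

-- ===== LEMMAS AND PROOFS =====

-- the snapshots one pass over cur emits: head bubbled to position j, for j = 1 .. len-1
def pvSnap (cur : List Int) : List (List Int) :=
  (List.range' 1 (cur.length - 1)).map (fun j => cur.tail.take j ++ [cur.headD 0] ++ cur.tail.drop j)

-- common specification both ports are reduced to: r passes of "emit pvSnap, rotate left"
def pvGen : Nat → List Int → List (List Int)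
  | 0, _ => []
  | r + 1, cur => pvSnap cur ++ pvGen r (cur.tail ++ [cur.headD 0])

-- A's k-th swap of a pass that started from h :: t moves h one slot further right
theorem pvSwapStepA_eq (h : Int) (t : List Int) (k : Nat) (hk : k < t.length) (p : List (List Int)) :
    pvSwapStepA (t.take k ++ h :: t.drop k, p) k
      = (t.take (k+1) ++ h :: t.drop (k+1), p ++ [t.take (k+1) ++ h :: t.drop (k+1)]) := by
  have hlen : (t.take k).length = k := by simp [hk.le]
  have hd : t.drop k = t[k] :: t.drop (k+1) := List.drop_eq_getElem_cons hk
  have ht : t.take (k+1) = t.take k ++ [t[k]] := by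
    rw [List.take_add_one, List.getElem?_eq_getElem hk]; rfl
  rw [ht]
  simp only [pvSwapStepA, List.getD, hd]
  rw [List.getElem?_append_right (by omega), List.getElem?_append_right (by omega)]
  simp [hlen]
  rw [List.getElem?_eq_getElem hk, hd, ht]
  simp [List.set]
  rw [ht, List.append_assoc, List.singleton_append]

-- the first k swaps of a pass: state and emitted snapshots in closed form
theorem pvPassA_aux (h : Int) (t : List Int) (p : List (List Int)) (k : Nat) (hk : k ≤ t.length) :
    (List.range k).foldl pvSwapStepA (h :: t, p)
      = (t.take k ++ h :: t.drop k,
         p ++ (List.range' 1 k).map (fun j => t.take j ++ [h] ++ t.drop j)) := by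
  induction k with
  | zero => simp
  | succ k ih =>
    rw [List.range_succ, List.foldl_append, ih (by omega), List.range'_concat]
    simp only [List.foldl_cons, List.foldl_nil]
    rw [pvSwapStepA_eq h t k (by omega)]
    simp [Nat.add_comm 1 k]

-- a full pass of A's inner loop = emit pvSnap, rotate left
theorem pvPassA_eq (h : Int) (t : List Int) (p : List (List Int)) :
    (List.range t.length).foldl pvSwapStepA (h :: t, p) = (t ++ [h], p ++ pvSnap (h :: t)) := by
  rw [pvPassA_aux h t p t.length le_rfl]
  simp [pvSnap]

theorem pvOuterA_eq : ∀ (ks l : List Int) (p : List (List Int)), 2 ≤ l.length →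
    pvOuterA ks l p = p ++ pvGen ks.length l := by
  intro ks
  induction ks with
  | nil => intro l p _; simp [pvOuterA, pvGen]
  | cons a ks ih =>
    intro l p hl
    obtain ⟨h, t, rfl⟩ : ∃ h t, l = h :: t := by
      cases l with
      | nil => simp at hl
      | cons h t => exact ⟨h, t, rfl⟩
    rw [pvOuterA]
    rw [if_neg (by simp only [List.length_cons] at hl ⊢; omega)]
    simp only [List.length_cons, Nat.add_sub_cancel]
    rw [pvPassA_eq h t p]
    rw [ih (t ++ [h]) (p ++ pvSnap (h :: t)) (by simp at hl ⊢; omega)]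
    simp [pvGen]

theorem pvFoldB_aux (n : Nat) (hn : 1 ≤ n) :
    ∀ (ks : List Nat) (cur : List Int) (p : List (List Int)), cur.length = n →
      (ks.foldl (fun (st : List Int × List (List Int)) _ =>
          (st.1.tail ++ [st.1.headD 0],
           st.2 ++ (List.range' 1 (n - 1)).map
             (fun j => st.1.tail.take j ++ [st.1.headD 0] ++ st.1.tail.drop j))) (cur, p)).2
        = p ++ pvGen ks.length cur := by
  intro ks
  induction ks with
  | nil => intro cur p _; simp [pvGen]
  | cons a ks ih =>
    intro cur p hc
    rw [List.foldl_cons]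
    rw [ih (cur.tail ++ [cur.headD 0]) _ (by simp [← hc]; omega)]
    have hsnap : (List.range' 1 (n - 1)).map
        (fun j => cur.tail.take j ++ [cur.headD 0] ++ cur.tail.drop j) = pvSnap cur := by
      rw [pvSnap, hc]
    rw [hsnap]
    simp [pvGen]

-- ===== VERDICT (by name: the statement is the Claim_ definition above) =====
theorem get_perms3_spec : Claim_equal_get_perms3 := by
  intro some_list _ hpre
  unfold Spec_get_perms3
  cases hsl : some_list with
  | nil => simp [get_perms3, get_perms3_alt, pvOuterA]
  | cons h t =>
    subst hsl
    have hn : 1 ≤ t.length := by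
      rcases t with _ | _ <;> simp_all [Pre_get_perms3]
    rw [get_perms3, pvOuterA_eq (h :: t) (h :: t) [] (by simp; omega)]
    rw [get_perms3_alt]
    rw [pvFoldB_aux (h :: t).length (by simp) (List.range (h :: t).length) (h :: t) [] rfl]
    simp
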